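-- pv_equiv track=rewrite | github.com/idaten459/bf_transpiler | tinybf/visualizer.py | _format_code_window
-- ===== SOURCE A (Python) =====
-- from typing import Iterable, List, Optional, Sequence
--
-- def _format_code_window(code: str, pc: int, window: int = 16) -> str:
--     if not code:
--         return "(empty)"
--     start = max(0, pc - window)
--     end = min(len(code), pc + window + 1)
--     pieces: List[str] = []
--     for index in range(start, end):
--         ch = code[index]
--         if index == pc:
--             pieces.append(f"[{ch}]")
--         else:
--             pieces.append(ch)
--     if pc >= len(code):
--         pieces.append("[END]")
--     return "".join(pieces)
-- ===== SOURCE B (Python) =====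
-- def _format_code_window(code: str, pc: int, window: int = 16) -> str:
--     if not code:
--         return "(empty)"
--     start = max(0, pc - window)
--     end = max(start, min(len(code), pc + window + 1))
--     if start <= pc < end:
--         out = code[start:pc] + "[" + code[pc] + "]" + code[pc + 1:end]
--     else:
--         out = code[start:end]
--     if pc >= len(code):
--         out += "[END]"
--     return out
-- ===== Notes on version B (the rewrite author's own statement) =====
-- stated objective: simpler
-- what changed: B builds the window from three bulk string slices (prefix, bracketed current char, suffix) plus the [END] marker, replacing A's index-by-index loop with a per-character branch and a pieces list; the bulk slices also make it measurably faster (interpreter-level constant factor).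
import Mathlib
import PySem

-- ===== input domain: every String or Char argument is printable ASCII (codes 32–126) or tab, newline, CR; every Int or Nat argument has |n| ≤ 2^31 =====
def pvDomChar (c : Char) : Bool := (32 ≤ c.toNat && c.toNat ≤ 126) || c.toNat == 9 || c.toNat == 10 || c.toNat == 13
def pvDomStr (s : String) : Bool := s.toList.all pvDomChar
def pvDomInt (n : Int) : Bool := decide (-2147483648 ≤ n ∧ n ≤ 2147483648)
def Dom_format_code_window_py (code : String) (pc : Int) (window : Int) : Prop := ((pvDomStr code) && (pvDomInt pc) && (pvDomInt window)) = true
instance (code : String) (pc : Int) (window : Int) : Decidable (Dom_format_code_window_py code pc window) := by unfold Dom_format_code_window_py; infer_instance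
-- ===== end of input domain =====

-- B rebuilds the window from three bulk slices (prefix, bracketed char, suffix) instead of
-- A's per-index loop with a branch on every character; objective: simpler decomposition.

-- ===== PORT A =====
-- literal port of A: loop over range(start, end), per-character branch, list of pieces, join
def format_code_window_py (code : String) (pc : Int) (window : Int) : String :=
  let cs := code.toList
  if cs = [] then "(empty)"
  else
    let start := max 0 (pc - window)
    let stop := min (PySem.List.len cs) (pc + window + 1)
    let pieces : List (List Char) :=
      (PySem.List.pyRange start stop 1).foldl (fun acc index =>
        let ch := PySem.List.pyGetD cs index ' '
        if index = pc then acc ++ [['['] ++ [ch] ++ [']']] else acc ++ [[ch]]) []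
    let pieces2 := if PySem.List.len cs ≤ pc then pieces ++ [['[', 'E', 'N', 'D', ']']] else pieces
    String.ofList pieces2.flatten

-- ===== PORT B =====
-- literal port of B: two bulk slices around the bracketed character (or one slice), then [END]
def format_code_window_py_alt (code : String) (pc : Int) (window : Int) : String :=
  let cs := code.toList
  if cs = [] then "(empty)"
  else
    let n := PySem.List.len cs
    let start := max 0 (pc - window)
    let stop := max start (min n (pc + window + 1))
    let out :=
      if start ≤ pc ∧ pc < stop then
        PySem.List.slice cs (some start) (some pc) ++ ['['] ++ [PySem.List.pyGetD cs pc ' '] ++ [']']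
          ++ PySem.List.slice cs (some (pc + 1)) (some stop)
      else
        PySem.List.slice cs (some start) (some stop)
    let out2 := if n ≤ pc then out ++ ['[', 'E', 'N', 'D', ']'] else out
    String.ofList out2

-- ===== PRECONDITION & SPEC =====
def Spec_format_code_window_py (code : String) (pc : Int) (window : Int) (out : String) : Prop := out = format_code_window_py_alt code pc window
instance (code : String) (pc : Int) (window : Int) (out : String) : Decidable (Spec_format_code_window_py code pc window out) := by unfold Spec_format_code_window_py; infer_instance

-- ===== CLAIM (what is proved, stated in full; the proofs are below) =====
def Claim_equal_format_code_window_py : Prop := ∀ (code : String) (pc : Int) (window : Int), Dom_format_code_window_py code pc window → Spec_format_code_window_py code pc window (format_code_window_py code pc window)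

-- ===== LEMMAS AND PROOFS =====

-- flattening a list of one-character pieces is the list of those characters
lemma flatten_map_singleton {α β : Type} (l : List α) (f : α → β) :
    (l.map (fun i => [f i])).flatten = l.map f := by
  induction l with
  | nil => rfl
  | cons x xs ih => simp [ih]

-- a window of single characters read index-by-index is the corresponding bulk slice
lemma mapseg_aux (cs : List Char) : ∀ (k : Nat) (a : Int), 0 ≤ a → a + k ≤ (cs.length : Int) →
    (PySem.List.pyRange a (a + k) 1).map (fun i => PySem.List.pyGetD cs i ' ') = (cs.drop a.toNat).take k := by
  intro k
  induction k with
  | zero => intro a _ _; simp [PySem.List.pyRange_one_eq_nil]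
  | succ k ih =>
    intro a ha hb
    have hlt : a < a + (k + 1 : Nat) := by push_cast; omega
    rw [PySem.List.pyRange_one_cons hlt, List.map_cons]
    have h1 : (a : Int) + ((k + 1 : Nat) : Int) = (a + 1) + (k : Nat) := by push_cast; ring
    rw [h1, ih (a + 1) (by omega) (by omega)]
    have hlen : a.toNat < cs.length := by push_cast at hb; omega
    rw [PySem.List.pyGetD_eq_getElem cs ' ' ha (by omega)]
    rw [List.drop_eq_getElem_cons hlen, List.take_succ_cons]
    have h2 : (a + 1).toNat = a.toNat + 1 := by omega
    rw [h2]

lemma mapseg (cs : List Char) (a b : Int) (ha : 0 ≤ a) (hab : a ≤ b) (hb : b ≤ (cs.length : Int)) :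
    (PySem.List.pyRange a b 1).map (fun i => PySem.List.pyGetD cs i ' ') = PySem.List.slice cs (some a) (some b) := by
  rw [PySem.List.slice_toNat cs ha (by omega)]
  have hbk : b = a + ((b - a).toNat : Int) := by omega
  rw [hbk, mapseg_aux cs (b - a).toNat a ha (by omega)]
  congr 1
  omega

-- ===== VERDICT (by name: the statement is the Claim_ definition above) =====
theorem format_code_window_py_spec : Claim_equal_format_code_window_py := by
  intro code pc window _
  unfold Spec_format_code_window_py format_code_window_py format_code_window_py_alt
  set cs := code.toList with hcs
  by_cases hemp : cs = []
  · simp [hemp]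
  · simp only [hemp, if_false]
    simp only [PySem.List.len_eq]
    set n : Int := (cs.length : Int) with hn
    set s : Int := max 0 (pc - window) with hs
    set e : Int := min n (pc + window + 1) with he
    have hs0 : 0 ≤ s := by omega
    set piece : Int → List Char := fun index =>
      if index = pc then ['[', PySem.List.pyGetD cs index ' ', ']']
      else [PySem.List.pyGetD cs index ' '] with hpiece
    -- rewrite A's loop (append one piece per index) as a map of per-index pieces
    have hfun : (fun (acc : List (List Char)) (index : Int) =>
        if index = pc then acc ++ [['['] ++ [PySem.List.pyGetD cs index ' '] ++ [']']]
        else acc ++ [[PySem.List.pyGetD cs index ' ']])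
        = fun acc index => acc ++ [piece index] := by
      funext acc index
      simp only [hpiece]
      split <;> simp
    rw [hfun, PySem.List.foldl_append_singleton_eq_map]
    -- main body equality
    have hcore : ((PySem.List.pyRange s e 1).map piece).flatten =
        (if s ≤ pc ∧ pc < max s e then
          PySem.List.slice cs (some s) (some pc) ++ ['['] ++ [PySem.List.pyGetD cs pc ' '] ++ [']']
            ++ PySem.List.slice cs (some (pc + 1)) (some (max s e))
        else PySem.List.slice cs (some s) (some (max s e))) := by
      by_cases hin : s ≤ pc ∧ pc < e
      · have hmax : max s e = e := by omega
        rw [if_pos (by omega), hmax]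
        rw [PySem.List.pyRange_one_append s pc e hin.1 (by omega)]
        rw [PySem.List.pyRange_one_cons hin.2]
        rw [List.map_append, List.map_cons, List.flatten_append, List.flatten_cons]
        have hleft : (PySem.List.pyRange s pc 1).map piece
            = (PySem.List.pyRange s pc 1).map (fun i => [PySem.List.pyGetD cs i ' ']) := by
          apply List.map_congr_left
          intro i hi
          have := (PySem.List.mem_pyRange_one).1 hi
          simp only [hpiece]
          rw [if_neg (by omega)]
        have hright : (PySem.List.pyRange (pc + 1) e 1).map piece
            = (PySem.List.pyRange (pc + 1) e 1).map (fun i => [PySem.List.pyGetD cs i ' ']) := by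
          apply List.map_congr_left
          intro i hi
          have := (PySem.List.mem_pyRange_one).1 hi
          simp only [hpiece]
          rw [if_neg (by omega)]
        rw [hleft, hright, flatten_map_singleton, flatten_map_singleton]
        rw [mapseg cs s pc hs0 hin.1 (by omega), mapseg cs (pc + 1) e (by omega) (by omega) (by omega)]
        simp only [hpiece, if_pos rfl]
        simp
      · rw [if_neg (by omega)]
        by_cases hse : e ≤ s
        · have hmax : max s e = s := by omega
          rw [hmax, PySem.List.pyRange_one_eq_nil hse]
          rw [PySem.List.slice_toNat cs hs0 hs0]
          simp
        · have hmax : max s e = e := by omega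
          rw [hmax]
          have hall : (PySem.List.pyRange s e 1).map piece
              = (PySem.List.pyRange s e 1).map (fun i => [PySem.List.pyGetD cs i ' ']) := by
            apply List.map_congr_left
            intro i hi
            have := (PySem.List.mem_pyRange_one).1 hi
            simp only [hpiece]
            rw [if_neg (by intro h; subst h; exact hin ⟨this.1, this.2⟩)]
          rw [hall, flatten_map_singleton, mapseg cs s e hs0 (by omega) (by omega)]
    -- the [END] suffix distributes identically on both sides
    by_cases hend : n ≤ pc
    · rw [if_pos hend, if_pos hend]
      simp only [List.nil_append, List.flatten_append, List.flatten_cons, List.flatten_nil,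
        List.append_nil, hcore]
    · rw [if_neg hend, if_neg hend]
      simp only [List.nil_append, hcore]
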